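-- pv_equiv track=rewrite | github.com/3974kjh/Etc_Test_File | crowling_test/finance_today.py | dividenum
-- ===== SOURCE A (Python) =====
-- def dividenum(A):
--     integer = ''
--     decimal = ''
--     dot_flag = 0
--     for cost in A:
--         if cost == '.':
--             dot_flag = 1
--         if dot_flag == 0 and cost != ',' and cost != '.':
--             integer +=cost
--         elif dot_flag == 1 and cost != ',' and cost != '.':
--             decimal +=cost
--     return integer, decimal
-- ===== SOURCE B (Python) =====
-- def dividenum(A):
--     i = A.find('.')
--     if i < 0:
--         i = len(A)
--     integer = ''.join(c for c in A[:i] if c != ',')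
--     decimal = ''.join(c for c in A[i+1:] if c not in ',.')
--     return integer, decimal
-- ===== Notes on version B (the rewrite author's own statement) =====
-- stated objective: faster
-- what changed: B replaces A's char-by-char loop with a mutable dot-flag by locating the first dot with str.find and building each part by slicing and filtering out separators, moving the scan into C-level string primitives.
import Mathlib
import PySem

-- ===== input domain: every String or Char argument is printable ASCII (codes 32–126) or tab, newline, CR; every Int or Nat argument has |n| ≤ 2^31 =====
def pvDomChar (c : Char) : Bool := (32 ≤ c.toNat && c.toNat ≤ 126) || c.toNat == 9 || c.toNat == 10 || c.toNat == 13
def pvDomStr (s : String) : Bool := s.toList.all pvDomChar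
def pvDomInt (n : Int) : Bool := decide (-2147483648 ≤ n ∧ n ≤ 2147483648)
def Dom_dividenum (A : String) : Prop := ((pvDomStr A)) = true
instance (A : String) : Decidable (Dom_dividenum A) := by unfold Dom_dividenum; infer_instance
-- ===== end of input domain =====

-- B replaces A's flag-carrying loop by find + slice + filter (measured constant-factor faster in Python).

-- ===== PORT A =====
-- A's loop body, step for step: possibly set the flag, then the if/elif chain (strings kept as char lists).
def dividenumStep (st : List Char × List Char × Nat) (cost : Char) : List Char × List Char × Nat :=
  let integer := st.1
  let decimal := st.2.1
  let dotFlag := st.2.2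
  let dotFlag := if cost = '.' then 1 else dotFlag
  if dotFlag = 0 ∧ cost ≠ ',' ∧ cost ≠ '.' then (integer ++ [cost], decimal, dotFlag)
  else if dotFlag = 1 ∧ cost ≠ ',' ∧ cost ≠ '.' then (integer, decimal ++ [cost], dotFlag)
  else (integer, decimal, dotFlag)

def dividenum (A : String) : String × String :=
  let st := A.toList.foldl dividenumStep ([], [], 0)
  (String.mk st.1, String.mk st.2.1)

-- ===== PORT B =====
def dividenum_alt (A : String) : String × String :=
  let cs := A.toList
  let i0 := PySem.Str.find A "."
  let i := if i0 < 0 then (cs.length : Int) else i0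
  let integer := (PySem.List.slice cs none (some i)).filter (fun c => !(c == ','))
  let decimal := (PySem.List.slice cs (some (i + 1)) none).filter (fun c => !(c == ',' || c == '.'))
  (String.mk integer, String.mk decimal)

-- ===== PRECONDITION & SPEC =====
def Spec_dividenum (A : String) (out : String × String) : Prop := out = dividenum_alt A
instance (A : String) (out : String × String) : Decidable (Spec_dividenum A out) := by unfold Spec_dividenum; infer_instance

-- ===== CLAIM (what is proved, stated in full; the proofs are below) =====
def Claim_equal_dividenum : Prop := ∀ (A : String), Dom_dividenum A → Spec_dividenum A (dividenum A)

-- ===== LEMMAS AND PROOFS =====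

-- With the flag already set, every remaining non-separator char goes to decimal.
theorem foldl_step_flag1 (cs I D : List Char) :
    cs.foldl dividenumStep (I, D, 1) =
      (I, D ++ cs.filter (fun c => !(c == ',' || c == '.')), 1) := by
  induction cs generalizing D with
  | nil => simp
  | cons c rest ih =>
    by_cases hc : c = '.'
    · subst hc; simp [List.foldl_cons, dividenumStep, ih]
    · by_cases hk : c = ','
      · subst hk; simp [List.foldl_cons, dividenumStep, ih]
      · simp [List.foldl_cons, dividenumStep, hc, hk, ih]

-- Before any '.', every non-comma char goes to integer and the flag stays 0.
theorem foldl_step_flag0 (cs I D : List Char) (h : ('.' : Char) ∉ cs) :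
    cs.foldl dividenumStep (I, D, 0) =
      (I ++ cs.filter (fun c => !(c == ',')), D, 0) := by
  induction cs generalizing I with
  | nil => simp
  | cons c rest ih =>
    have hc : c ≠ '.' := fun hh => h (hh ▸ List.mem_cons_self)
    have hr : ('.' : Char) ∉ rest := fun hh => h (List.mem_cons_of_mem _ hh)
    by_cases hk : c = ','
    · subst hk; simp [List.foldl_cons, dividenumStep, ih _ hr]
    · simp [List.foldl_cons, dividenumStep, hc, hk, ih _ hr]

theorem singleton_infix_iff (a : Char) (l : List Char) : [a] <:+: l ↔ a ∈ l := by
  constructor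
  · intro h; exact h.mem List.mem_cons_self
  · intro h
    obtain ⟨s, t, rfl⟩ := List.append_of_mem h
    exact ⟨s, t, by simp⟩

theorem dividenum_spec' (A : String) : dividenum A = dividenum_alt A := by
  unfold dividenum dividenum_alt
  simp only []
  set cs := A.toList with hcs
  by_cases h : ('.' : Char) ∈ cs
  · -- find returns the index n of the first '.'
    have hfind : PySem.Str.find A "." = PySem.Chars.find cs [('.' : Char)] := by
      simp [PySem.Str.find_eq, hcs]
    have hinf : [('.' : Char)] <:+: cs := (singleton_infix_iff _ _).2 h
    have hpos : 0 ≤ PySem.Chars.find cs [('.' : Char)] :=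
      (PySem.Chars.find_nonneg_iff _ _).2 hinf
    obtain ⟨hpre, hmin⟩ := PySem.Chars.find_spec (s := cs) (sub := [('.' : Char)]) hpos
    set n := (PySem.Chars.find cs [('.' : Char)]).toNat with hn
    have hlen : n < cs.length := by
      by_contra hge
      push_neg at hge
      have : cs.drop n = [] := List.drop_eq_nil_of_le hge
      rw [this] at hpre
      exact absurd (List.IsPrefix.length_le hpre) (by simp)
    -- cs.drop n starts with '.'
    have hdropn : cs.drop n = '.' :: cs.drop (n + 1) := by
      obtain ⟨t, ht⟩ := hpre
      rw [← ht]
      have : cs.drop (n + 1) = t := by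
        have := congrArg (List.drop 1) ht
        simpa [List.drop_drop, Nat.add_comm] using this.symm
      rw [this]; rfl
    -- no '.' among the first n chars
    have hnotmem : ('.' : Char) ∉ cs.take n := by
      intro hmem
      obtain ⟨i, hi, hget⟩ := List.getElem_of_mem hmem
      have hilt : i < n := lt_of_lt_of_le hi (by simp)
      have : [('.' : Char)] <+: cs.drop i := by
        have hgi : cs[i]'(lt_of_lt_of_le hilt hlen.le) = '.' := by
          have := hget
          rwa [List.getElem_take] at this
        have : cs.drop i = '.' :: cs.drop (i + 1) := by
          rw [List.drop_eq_getElem_cons (lt_of_lt_of_le hilt hlen.le), hgi]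
        exact ⟨cs.drop (i + 1), by rw [this]; rfl⟩
      exact hmin i hilt this
    have hneg : ¬ PySem.Chars.find cs [('.' : Char)] < 0 := not_lt.2 hpos
    have hfi : PySem.Chars.find cs [('.' : Char)] = (n : Int) := by omega
    rw [hfind, if_neg hneg, hfi]
    have hslice1 : PySem.List.slice cs none (some (n : Int)) = cs.take n :=
      PySem.List.slice_to_natCast cs n
    have hslice2 : PySem.List.slice cs (some ((n : Int) + 1)) none = cs.drop (n + 1) := by
      have : ((n : Int) + 1) = ((n + 1 : Nat) : Int) := by push_cast; ring
      rw [this]; exact PySem.List.slice_from_natCast cs (n + 1)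
    -- evaluate A's fold: take n, then the '.', then the tail with flag 1
    conv_lhs => rw [← List.take_append_drop n cs, hdropn]
    rw [List.foldl_append, foldl_step_flag0 _ _ _ hnotmem, List.foldl_cons]
    have hstepdot : dividenumStep (([] : List Char) ++ (cs.take n).filter (fun c => !(c == ',')), ([] : List Char), 0) '.' =
        ((cs.take n).filter (fun c => !(c == ',')), ([] : List Char), 1) := by
      simp [dividenumStep]
    rw [hstepdot, foldl_step_flag1]
    simp [hslice1, hslice2]
  · -- no '.' : find = -1, i = length, decimal slice is empty
    have hfind : PySem.Str.find A "." = -1 := by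
      rw [PySem.Str.find_eq]
      exact (PySem.Chars.find_eq_neg_one_iff _ _).2
        (fun hinf => h ((singleton_infix_iff _ _).1 (by simpa [hcs] using hinf)))
    rw [hfind, if_pos (by norm_num)]
    have hslice1 : PySem.List.slice cs none (some ((cs.length : Int))) = cs.take cs.length :=
      PySem.List.slice_to_natCast cs cs.length
    have hslice2 : PySem.List.slice cs (some ((cs.length : Int) + 1)) none = cs.drop (cs.length + 1) := by
      have : ((cs.length : Int) + 1) = ((cs.length + 1 : Nat) : Int) := by push_cast; ring
      rw [this]; exact PySem.List.slice_from_natCast cs (cs.length + 1)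
    rw [foldl_step_flag0 _ _ _ h]
    simp [hslice1, hslice2, List.drop_eq_nil_of_le]

-- ===== VERDICT (by name: the statement is the Claim_ definition above) =====
theorem dividenum_spec : Claim_equal_dividenum := by
  intro A _
  unfold Spec_dividenum
  exact dividenum_spec' A
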